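-- pv_equiv track=rewrite | github.com/geraud-g/advent-of-code | aoc_2025/day_03/day_03.py | get_largest_joltage
-- ===== SOURCE A (Python) =====
-- def get_largest_joltage(bank: list[int], battery_nbr: int) -> int:
--     joltage = 0
--     offset = 0
--
--     for i in range(battery_nbr - 1, 0, -1):
--         value = max(bank[offset:-i])
--         offset = offset + bank[offset:-i].index(value) + 1
--         joltage = (joltage + value) * 10
--     return joltage + max(bank[offset:])
-- ===== SOURCE B (Python) =====
-- def get_largest_joltage(bank: list[int], battery_nbr: int) -> int:
--     # One-pass monotonic-stack selection of the lexicographically largest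
--     # length-k subsequence, instead of repeated max/index scans.
--     k = battery_nbr if battery_nbr > 1 else 1
--     to_pop = len(bank) - k
--     stack = []
--     for v in bank:
--         while to_pop > 0 and stack and stack[-1] < v:
--             stack.pop()
--             to_pop -= 1
--         stack.append(v)
--     joltage = 0
--     for i in range(k):
--         joltage = joltage * 10 + stack[i]
--     return joltage
-- ===== Notes on version B (the rewrite author's own statement) =====
-- stated objective: faster
-- what changed: Replaced the per-battery rescans (max + index over a shrinking slice for each of the k picks) by a single left-to-right monotonic-stack pass that selects the same lexicographically largest length-k subsequence, then folds it into the number.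
import Mathlib
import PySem

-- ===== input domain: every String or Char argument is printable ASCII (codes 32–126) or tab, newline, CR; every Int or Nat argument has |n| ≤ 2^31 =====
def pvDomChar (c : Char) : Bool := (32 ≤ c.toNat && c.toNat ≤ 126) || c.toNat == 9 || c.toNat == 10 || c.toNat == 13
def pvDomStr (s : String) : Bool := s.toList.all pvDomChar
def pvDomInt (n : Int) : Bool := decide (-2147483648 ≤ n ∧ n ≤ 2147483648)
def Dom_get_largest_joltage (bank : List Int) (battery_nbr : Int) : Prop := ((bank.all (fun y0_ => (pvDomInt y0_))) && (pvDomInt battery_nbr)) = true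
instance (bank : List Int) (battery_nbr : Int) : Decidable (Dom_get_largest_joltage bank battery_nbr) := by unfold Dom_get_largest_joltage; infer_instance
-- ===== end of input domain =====

-- B replaces A's k rescans (max+index per selected battery) by one monotonic-stack pass
-- selecting the same lexicographically largest length-k subsequence (asymptotically faster).

-- ===== PORT A =====
-- one iteration of A's loop body; state = (joltage, offset).
-- max()/.index() on the slice are ported with max?/index?; Pre_ guarantees the slice is
-- nonempty, so the `.getD` defaults are never used on admitted inputs.
def aStep (bank : List Int) (st : Int × Int) (i : Int) : Int × Int :=
  let sl := PySem.List.slice bank (some st.2) (some (-i))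
  let value := (PySem.List.max? sl (fun y => y)).getD 0
  let offset := st.2 + (((PySem.List.index? sl value).getD 0 : Nat) : Int) + 1
  ((st.1 + value) * 10, offset)

def get_largest_joltage (bank : List Int) (battery_nbr : Int) : Int :=
  let st := (PySem.List.pyRange (battery_nbr - 1) 0 (-1)).foldl (aStep bank) (0, 0)
  st.1 + (PySem.List.max? (PySem.List.slice bank (some st.2) none) (fun y => y)).getD 0

-- ===== PORT B =====
-- the `while to_pop > 0 and stack and stack[-1] < v` loop; stack head = Python stack top.
def bPop (v : Int) : List Int → Int → List Int × Int
  | [], b => ([], b)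
  | h :: t, b => if b > 0 && h < v then bPop v t (b - 1) else (h :: t, b)

-- stack[i] is ported with pyGet?; Pre_ guarantees i < len(stack), so the `.getD` default
-- is never used on admitted inputs (in Python the loop raises IndexError exactly there).
def get_largest_joltage_alt (bank : List Int) (battery_nbr : Int) : Int :=
  let k : Int := if battery_nbr > 1 then battery_nbr else 1
  let st := bank.foldl (fun (s : List Int × Int) v =>
      let p := bPop v s.1 s.2
      (v :: p.1, p.2)) ([], (bank.length : Int) - k)
  (PySem.List.pyRange 0 k 1).foldl
    (fun j i => j * 10 + (PySem.List.pyGet? st.1.reverse i).getD 0) 0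

-- ===== PRECONDITION & SPEC =====
-- Pre_ excludes exactly the inputs where A raises ValueError (max() of an empty slice):
-- the empty bank, and battery_nbr larger than the bank size.
def Pre_get_largest_joltage (bank : List Int) (battery_nbr : Int) : Prop :=
  bank ≠ [] ∧ battery_nbr ≤ (bank.length : Int)
instance (bank : List Int) (battery_nbr : Int) : Decidable (Pre_get_largest_joltage bank battery_nbr) := by unfold Pre_get_largest_joltage; infer_instance
def pvWitness_get_largest_joltage : List Int × Int := ([3, 1, 4, 1, 5], 3)

def Spec_get_largest_joltage (bank : List Int) (battery_nbr : Int) (out : Int) : Prop := out = get_largest_joltage_alt bank battery_nbr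
instance (bank : List Int) (battery_nbr : Int) (out : Int) : Decidable (Spec_get_largest_joltage bank battery_nbr out) := by unfold Spec_get_largest_joltage; infer_instance

-- ===== CLAIM (what is proved, stated in full; the proofs are below) =====
def Claim_equal_get_largest_joltage : Prop := ∀ (bank : List Int) (battery_nbr : Int), Dom_get_largest_joltage bank battery_nbr → Pre_get_largest_joltage bank battery_nbr → Spec_get_largest_joltage bank battery_nbr (get_largest_joltage bank battery_nbr)

-- ===== LEMMAS AND PROOFS =====

-- the greedy selection both programs compute: pick the first maximum of the window that
-- leaves enough elements for the remaining picks, recurse on what follows it.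
def greedy : Nat → List Int → List Int
  | 0, _ => []
  | k + 1, l =>
    let w := l.take (l.length - k)
    match PySem.List.max? w (fun y => y) with
    | none => []
    | some m =>
      match PySem.List.index? w m with
      | none => []
      | some idx => m :: greedy k (l.drop (idx + 1))

-- A's accumulation shape: joltage = (joltage + v) * 10 per loop value, + the last value.
def aNum (j : Int) : List Int → Int
  | [] => j
  | v :: rest => if rest.isEmpty then j + v else aNum ((j + v) * 10) rest

def bStep (s : List Int × Int) (v : Int) : List Int × Int :=
  let p := bPop v s.1 s.2
  (v :: p.1, p.2)

theorem max_index_exists (w : List Int) (hw : w ≠ []) :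
    ∃ m idx, PySem.List.max? w (fun y => y) = some m ∧ PySem.List.index? w m = some idx ∧
      ∀ y ∈ w, y ≤ m := by
  obtain ⟨m, hm⟩ : ∃ m, PySem.List.max? w (fun y => y) = some m := by
    cases hmx : PySem.List.max? w (fun y => y) with
    | none => exact absurd ((PySem.List.max?_eq_none_iff _ _).mp hmx) hw
    | some m => exact ⟨m, rfl⟩
  obtain ⟨idx, hidx⟩ : ∃ idx, PySem.List.index? w m = some idx := by
    cases hix : PySem.List.index? w m with
    | none =>
      exact absurd ((PySem.List.index?_isSome_iff _ _).mpr (PySem.List.max?_mem hm)) (by rw [hix]; simp)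
    | some idx => exact ⟨idx, rfl⟩
  exact ⟨m, idx, hm, hidx, fun y hy => PySem.List.max?_isMax hm y hy⟩

theorem greedy_cons (k : Nat) (l : List Int) (m : Int) (idx : Nat)
    (hm : PySem.List.max? (l.take (l.length - k)) (fun y => y) = some m)
    (hidx : PySem.List.index? (l.take (l.length - k)) m = some idx) :
    greedy (k + 1) l = m :: greedy k (l.drop (idx + 1)) := by
  conv_lhs => rw [greedy]
  simp only [hm, hidx]

theorem greedy_ne_nil (k : Nat) (l : List Int) (h : k + 1 ≤ l.length) :
    greedy (k + 1) l ≠ [] := by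
  obtain ⟨m, idx, hm, hidx, _⟩ := max_index_exists (l.take (l.length - k))
    (List.ne_nil_of_length_pos (by simp; omega))
  rw [greedy_cons k l m idx hm hidx]
  simp

theorem mem_take_of_lt (l : List Int) (n i : Nat) (hn : i < n) (hl : i < l.length) :
    l[i] ∈ l.take n := by
  have h2 : i < (l.take n).length := by simp; omega
  have h3 : (l.take n)[i]'h2 = l[i] := by simp [List.getElem_take]
  rw [← h3]
  exact List.getElem_mem h2


theorem slice_nonneg_negEnd (xs : List Int) (off i : Nat) (hoff : off ≤ xs.length) (hi : 0 < i) :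
    PySem.List.slice xs (some (off : Int)) (some (-(i : Int))) =
      (xs.drop off).take (xs.length - i - off) := by
  simp [PySem.List.slice, PySem.List.clampIdx_neg_natCast _ _ hi, PySem.List.clampIdx_natCast]
  rw [Nat.min_eq_left hoff]

theorem bPop_spec (v : Int) : ∀ (st : List Int) (b : Int),
    ∃ d : Nat, d ≤ st.length ∧ ((d : Int) ≤ b ∨ d = 0) ∧ (b ≤ 0 → d = 0) ∧
      bPop v st b = (st.drop d, b - d) := by
  intro st
  induction st with
  | nil => intro b; exact ⟨0, by simp [bPop]⟩
  | cons h t ih =>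
    intro b
    by_cases hc : b > 0 ∧ h < v
    · obtain ⟨d, hd1, hd2, hd3, hd4⟩ := ih (b - 1)
      refine ⟨d + 1, by simpa using hd1, by push_cast; omega, by omega, ?_⟩
      simp only [bPop, hc.1, hc.2, decide_true, Bool.and_self, if_pos, hd4,
        Prod.mk.injEq, List.drop_succ_cons]
      refine ⟨by trivial, by push_cast; ring⟩
    · refine ⟨0, by simp, Or.inr rfl, by simp, ?_⟩
      simp only [bPop]
      have : ¬ (b > 0 && h < v) = true := by simpa [decide_eq_true_eq] using hc
      simp [this]

theorem bPop_all (v : Int) : ∀ (st : List Int) (b : Int),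
    (∀ x ∈ st, x < v) → (st.length : Int) ≤ b →
    bPop v st b = ([], b - st.length) := by
  intro st
  induction st with
  | nil => intro b _ _; simp [bPop]
  | cons h t ih =>
    intro b hlt hb
    simp only [List.length_cons] at hb
    have hb0 : b > 0 := by push_cast at hb; omega
    simp only [bPop, hb0, hlt h (by simp), decide_true, Bool.and_self, if_pos]
    rw [ih (b-1) (fun x hx => hlt x (by simp [hx])) (by push_cast at hb ⊢; omega)]
    simp only [Prod.mk.injEq, List.length_cons]
    refine ⟨by trivial, by push_cast; ring⟩

theorem bPop_append (v m : Int) : ∀ (st : List Int) (b : Int),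
    ((st.length : Int) < b → v ≤ m) →
    bPop v (st ++ [m]) b = ((bPop v st b).1 ++ [m], (bPop v st b).2) := by
  intro st
  induction st with
  | nil =>
    intro b hcond
    by_cases hb : 0 < b
    · have hvm := hcond (by simpa using hb)
      have : ¬ (m < v) := not_lt.mpr hvm
      simp [bPop, this]
    · simp only [List.nil_append, bPop]
      have : ¬ (b > 0) := hb
      simp [this]
  | cons h t ih =>
    intro b hcond
    by_cases hc : b > 0 ∧ h < v
    · simp only [List.cons_append, bPop, hc.1, hc.2, decide_true, Bool.and_self, if_pos]
      exact ih (b-1) (by intro hl; apply hcond; simp only [List.length_cons]; push_cast at hl ⊢; omega)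
    · have : ¬ (b > 0 && h < v) = true := by simpa [decide_eq_true_eq] using hc
      simp only [List.cons_append, bPop, this, if_neg, Bool.false_eq_true, not_false_iff]

theorem aNum_aux : ∀ (l : List Int) (j : Int), l ≠ [] →
    l.foldl (fun j v => j * 10 + v) j = aNum (j * 10) l := by
  intro l
  induction l with
  | nil => intro j h; exact absurd rfl h
  | cons v r ih =>
    intro j _
    cases r with
    | nil => simp [aNum]
    | cons w r' =>
      rw [List.foldl_cons, ih (j * 10 + v) (by simp),
        show aNum (j * 10) (v :: w :: r') = aNum ((j * 10 + v) * 10) (w :: r') from by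
          simp [aNum]]

theorem aNum_foldl (l : List Int) : l.foldl (fun j v => j * 10 + v) 0 = aNum 0 l := by
  cases l with
  | nil => rfl
  | cons v r =>
    have := aNum_aux (v :: r) 0 (by simp)
    simpa using this

theorem bfold_prefix (m : Int) (rest : List Int) : ∀ (p st : List Int) (b : Int),
    (∀ x ∈ p, x < m) → (∀ x ∈ st, x < m) → ((st.length : Int) + p.length ≤ b) →
    (p ++ m :: rest).foldl bStep (st, b) = rest.foldl bStep ([m], b - st.length - p.length) := by
  intro p
  induction p with
  | nil =>
    intro st b _ hst hb
    simp only [List.nil_append, List.foldl_cons, List.length_nil, Nat.cast_zero, Int.sub_zero]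
    rw [show bStep (st, b) m = ([m], b - st.length) from by
      simp [bStep, bPop_all m st b hst (by push_cast at hb ⊢; omega)]]
  | cons v p' ih =>
    intro st b hp hst hb
    simp only [List.cons_append, List.foldl_cons]
    obtain ⟨d, hd1, hd2, _, hd4⟩ := bPop_spec v st b
    rw [show bStep (st, b) v = (v :: st.drop d, b - d) from by simp [bStep, hd4]]
    rw [ih (v :: st.drop d) (b - d)
      (fun x hx => hp x (by simp [hx]))
      (by
        intro x hx
        rcases List.mem_cons.mp hx with h | h
        · exact h ▸ hp v (by simp)
        · exact hst x (List.mem_of_mem_drop h))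
      (by
        push_cast [List.length_cons, List.length_drop, Nat.cast_sub hd1] at hb ⊢
        omega)]
    congr 1
    push_cast [List.length_cons, List.length_drop, Nat.cast_sub hd1]
    ring

theorem bfold_bottom (m : Int) : ∀ (r st : List Int) (b : Int),
    (∀ (j : Nat), (h : j < r.length) → (st.length : Int) + j < b → r[j] ≤ m) →
    (r.foldl bStep (st ++ [m], b)).1 = (r.foldl bStep (st, b)).1 ++ [m] := by
  intro r
  induction r with
  | nil => intro st b _; rfl
  | cons v r' ih =>
    intro st b hcond
    simp only [List.foldl_cons]
    obtain ⟨d, hd1, hd2, _, hd4⟩ := bPop_spec v st b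
    have happ := bPop_append v m st b (by
      intro hl
      exact hcond 0 (by simp) (by simpa using hl))
    rw [show bStep (st ++ [m], b) v = ((v :: (bPop v st b).1) ++ [m], (bPop v st b).2) from by
      simp [bStep, happ]]
    rw [show bStep (st, b) v = (v :: (bPop v st b).1, (bPop v st b).2) from by simp [bStep]]
    rw [hd4]
    exact ih (v :: st.drop d) (b - d) (by
      intro j hj hlt
      have := hcond (j + 1) (by simpa using hj) (by
        simp only [List.length_cons, List.length_drop] at hlt ⊢
        omega)
      simpa using this)

theorem bfold_greedy : ∀ (k : Nat) (l : List Int), 1 ≤ k → k ≤ l.length →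
    ((l.foldl bStep ([], (l.length : Int) - k)).1.reverse.take k) = greedy k l := by
  intro k
  induction k with
  | zero => intro l h1 _; exact absurd h1 (by omega)
  | succ k ih =>
    intro l _ hk
    obtain ⟨m, idx, hm, hidx, hmax⟩ := max_index_exists (l.take (l.length - k))
      (List.ne_nil_of_length_pos (by simp; omega))
    obtain ⟨pre, suf, hwdecomp, hprelen, hmnotpre⟩ :=
      (PySem.List.index?_eq_some_iff _ _ _).mp hidx
    have hwlen : (l.take (l.length - k)).length = l.length - k := by simp
    have hidxlt : idx < l.length - k := by
      rw [← hwlen, ← hprelen, hwdecomp]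
      simp
    have hldecomp : l = pre ++ m :: (suf ++ l.drop (l.length - k)) := by
      conv_lhs => rw [← List.take_append_drop (l.length - k) l, hwdecomp]
      simp
    set rest := suf ++ l.drop (l.length - k) with hrest
    have hlen2 : l.length = idx + 1 + rest.length := by
      have h := congrArg List.length hldecomp
      simp only [List.length_append, List.length_cons, hprelen] at h
      omega
    have hrestlen : rest.length = l.length - (idx + 1) := by omega
    have hrestdrop : l.drop (idx + 1) = rest := by
      conv_lhs => rw [hldecomp]
      rw [show idx + 1 = (pre ++ [m]).length from by simp [hprelen]]
      rw [show pre ++ m :: rest = (pre ++ [m]) ++ rest from by simp]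
      exact List.drop_left
    have hpre_lt : ∀ x ∈ pre, x < m := by
      intro x hx
      have hxw : x ∈ l.take (l.length - k) := by rw [hwdecomp]; simp [hx]
      exact lt_of_le_of_ne (hmax x hxw) (fun he => hmnotpre (he ▸ hx))
    have h1 : l.foldl bStep ([], (l.length : Int) - (k + 1 : Nat)) =
        rest.foldl bStep ([m], ((l.length : Int) - (k + 1 : Nat)) - idx) := by
      conv_lhs => rw [hldecomp]
      rw [bfold_prefix m rest pre [] _ hpre_lt (by simp)
        (by rw [← hldecomp]; simp only [List.length_nil, hprelen]; push_cast; omega)]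
      congr 1
      rw [← hldecomp]
      refine Prod.ext_iff.mpr ⟨rfl, ?_⟩
      simp only [List.length_nil, hprelen]
      push_cast
      ring
    have hcond : ∀ (j : Nat), (h : j < rest.length) →
        ((([] : List Int)).length : Int) + j < ((l.length : Int) - (k + 1 : Nat)) - idx →
        rest[j] ≤ m := by
      intro j hj hlt
      have hji : idx + 1 + j < l.length - k := by
        simp only [List.length_nil, Nat.cast_zero] at hlt
        push_cast at hlt
        omega
      have hji2 : idx + 1 + j < l.length := by omega
      have hrj : rest[j] = l[idx + 1 + j]'hji2 := by
        rw [List.getElem_of_eq hrestdrop.symm hj]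
        simp [List.getElem_drop]
      rw [hrj]
      exact hmax _ (mem_take_of_lt l (l.length - k) (idx + 1 + j) hji hji2)
    have h2 := bfold_bottom m rest [] (((l.length : Int) - (k + 1 : Nat)) - idx) hcond
    simp only [List.nil_append] at h2
    rw [h1, h2, greedy_cons k l m idx hm hidx, hrestdrop,
      List.reverse_append, List.reverse_singleton]
    simp only [List.singleton_append, List.take_succ_cons]
    congr 1
    rcases Nat.eq_zero_or_pos k with hk0 | hk1
    · subst hk0; simp [greedy]
    · rw [← ih rest hk1 (by omega)]
      congr 2
      rw [hlen2]
      push_cast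
      ring

theorem aside (k : Nat) : ∀ (bank : List Int) (off : Nat) (j : Int),
    off ≤ bank.length → k < bank.length - off →
    (let st := (PySem.List.pyRange (k : Int) 0 (-1)).foldl (aStep bank) (j, (off : Int))
     st.1 + (PySem.List.max? (PySem.List.slice bank (some st.2) none) (fun y => y)).getD 0)
    = aNum j (greedy (k + 1) (bank.drop off)) := by
  induction k with
  | zero =>
    intro bank off j hoff hlt
    simp only [Nat.cast_zero, PySem.List.pyRange_neg_one_eq_nil le_rfl, List.foldl_nil]
    rw [PySem.List.slice_from bank (Int.natCast_nonneg off)]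
    simp only [Int.toNat_natCast]
    obtain ⟨m, idx, hm, hidx, _⟩ := max_index_exists (bank.drop off)
      (List.ne_nil_of_length_pos (by simp; omega))
    have hg : greedy 1 (bank.drop off) = [m] := by
      have e1 : (bank.drop off).take ((bank.drop off).length - 0) = bank.drop off := by
        rw [Nat.sub_zero, List.take_length]
      have := greedy_cons 0 (bank.drop off) m idx
        (by rw [e1]; exact hm) (by rw [e1]; exact hidx)
      simpa [greedy] using this
    rw [hg]
    simp [aNum, hm]
  | succ k ih =>
    intro bank off j hoff hlt
    have hcons : PySem.List.pyRange ((k + 1 : Nat) : Int) 0 (-1) =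
        ((k + 1 : Nat) : Int) :: PySem.List.pyRange (k : Int) 0 (-1) := by
      rw [PySem.List.pyRange_neg_one_cons (by push_cast; omega)]
      congr 1
      push_cast
      ring
    rw [hcons, List.foldl_cons]
    have hslice := slice_nonneg_negEnd bank off (k + 1) hoff (by omega)
    set w := (bank.drop off).take (bank.length - (k + 1) - off) with hwdef
    obtain ⟨m, idx, hm, hidx, _⟩ := max_index_exists w
      (List.ne_nil_of_length_pos (by simp [hwdef]; omega))
    have hidxlt : idx < bank.length - (k + 1) - off := by
      obtain ⟨pre, suf, hwdec, hplen, _⟩ := (PySem.List.index?_eq_some_iff _ _ _).mp hidx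
      have hwl : w.length = bank.length - (k + 1) - off := by simp [hwdef]; omega
      rw [← hwl, ← hplen, hwdec]
      simp
    have hstep : aStep bank (j, (off : Int)) ((k + 1 : Nat) : Int) =
        ((j + m) * 10, ((off + idx + 1 : Nat) : Int)) := by
      simp only [aStep, hslice, hm, hidx, Option.getD_some, Prod.mk.injEq, true_and]
      try push_cast
      try ring
    rw [hstep, ih bank (off + idx + 1) ((j + m) * 10) (by omega) (by omega)]
    have hwg : (bank.drop off).take ((bank.drop off).length - (k + 1)) = w := by
      simp only [hwdef, List.length_drop]
      congr 1 <;> omega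
    have hdd : (bank.drop off).drop (idx + 1) = bank.drop (off + idx + 1) := by
      rw [List.drop_drop]
      congr 1 <;> omega
    have hgreedy : greedy (k + 1 + 1) (bank.drop off) =
        m :: greedy (k + 1) (bank.drop (off + idx + 1)) := by
      rw [greedy_cons (k + 1) (bank.drop off) m idx (by rw [hwg]; exact hm)
        (by rw [hwg]; exact hidx), hdd]
    rw [hgreedy]
    have hne : greedy (k + 1) (bank.drop (off + idx + 1)) ≠ [] := by
      apply greedy_ne_nil
      simp only [List.length_drop]
      omega
    rw [show aNum j (m :: greedy (k + 1) (bank.drop (off + idx + 1))) =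
        aNum ((j + m) * 10) (greedy (k + 1) (bank.drop (off + idx + 1))) from by
      rw [aNum, if_neg (by simpa using hne)]]

theorem bfold_len : ∀ (l st : List Int) (b : Int), 0 ≤ b →
    0 ≤ (l.foldl bStep (st, b)).2 ∧
    (st.length : Int) + l.length - b ≤ ((l.foldl bStep (st, b)).1.length : Int) := by
  intro l
  induction l with
  | nil =>
    intro st b hb
    simp only [List.foldl_nil, List.length_nil]
    omega
  | cons v l' ih =>
    intro st b hb
    simp only [List.foldl_cons]
    obtain ⟨d, hd1, hd2, _, hd4⟩ := bPop_spec v st b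
    rw [show bStep (st, b) v = (v :: st.drop d, b - d) from by simp [bStep, hd4]]
    have hb' : 0 ≤ b - d := by rcases hd2 with h | h <;> omega
    obtain ⟨h1, h2⟩ := ih (v :: st.drop d) (b - d) hb'
    refine ⟨h1, ?_⟩
    simp only [List.length_cons, List.length_drop] at h2 ⊢
    omega

theorem range_fold_take (xs : List Int) : ∀ (k : Nat), k ≤ xs.length →
    (PySem.List.pyRange 0 (k : Int) 1).foldl
      (fun j i => j * 10 + (PySem.List.pyGet? xs i).getD 0) 0
    = (xs.take k).foldl (fun j v => j * 10 + v) 0 := by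
  intro k
  induction k with
  | zero =>
    intro _
    simp [PySem.List.pyRange_one_eq_nil]
  | succ k ih =>
    intro hk
    have hk2 : k < xs.length := by omega
    rw [show ((k + 1 : Nat) : Int) = (k : Int) + 1 from by push_cast; ring,
      PySem.List.pyRange_one_succ_right (Int.natCast_nonneg k), List.foldl_append,
      ih (by omega), List.take_succ, List.foldl_append, List.getElem?_eq_getElem hk2]
    simp [PySem.List.pyGet?_natCast, List.getElem?_eq_getElem hk2]

-- ===== VERDICT (by name: the statement is the Claim_ definition above) =====
theorem get_largest_joltage_spec : Claim_equal_get_largest_joltage := by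
  intro bank battery_nbr _ hpre
  obtain ⟨hne, hlen⟩ := hpre
  unfold Spec_get_largest_joltage
  have hn1 : 1 ≤ bank.length := List.length_pos_of_ne_nil hne
  set K : Int := if battery_nbr > 1 then battery_nbr else 1 with hKdef
  have hK1 : 1 ≤ K := by rw [hKdef]; split_ifs with h <;> omega
  have hKlen : K ≤ (bank.length : Int) := by
    rw [hKdef]; split_ifs with h
    · exact hlen
    · exact_mod_cast hn1
  set k' : Nat := K.toNat with hk'def
  have hk'K : (k' : Int) = K := Int.toNat_of_nonneg (by omega)
  have hk'1 : 1 ≤ k' := by omega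
  have hk'len : k' ≤ bank.length := by omega
  have hA : get_largest_joltage bank battery_nbr = aNum 0 (greedy k' bank) := by
    have hrange : PySem.List.pyRange (battery_nbr - 1) 0 (-1) =
        PySem.List.pyRange ((k' - 1 : Nat) : Int) 0 (-1) := by
      by_cases h : battery_nbr > 1
      · congr 1
        have : K = battery_nbr := by rw [hKdef, if_pos h]
        omega
      · rw [PySem.List.pyRange_neg_one_eq_nil (by omega),
          PySem.List.pyRange_neg_one_eq_nil (by
            have : K = 1 := by rw [hKdef, if_neg h]
            omega)]
    have haside := aside (k' - 1) bank 0 0 (Nat.zero_le _) (by omega)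
    simp only [Nat.cast_zero, List.drop_zero, Nat.sub_add_cancel hk'1] at haside
    unfold get_largest_joltage
    rw [hrange]
    exact haside
  have hB : get_largest_joltage_alt bank battery_nbr = aNum 0 (greedy k' bank) := by
    simp only [get_largest_joltage_alt]
    rw [show (fun (s : List Int × Int) v =>
        let p := bPop v s.1 s.2
        (v :: p.1, p.2)) = bStep from rfl]
    rw [← hKdef, ← hk'K]
    have hstlen := (bfold_len bank [] ((bank.length : Int) - k') (by push_cast; omega)).2
    have hrevlen : k' ≤ (bank.foldl bStep ([], (bank.length : Int) - (k' : Int))).1.reverse.length := by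
      simp only [List.length_reverse, List.length_nil] at hstlen ⊢
      omega
    rw [range_fold_take _ k' hrevlen, bfold_greedy k' bank hk'1 hk'len]
    exact aNum_foldl _
  rw [hA, hB]
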